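-- pv_equiv track=rewrite | github.com/skthewimp/stalker-mac | app.py | extract_display_name
-- ===== SOURCE A (Python) =====
-- def extract_display_name(text: str) -> str | None:
--     found = False
--     for line in text.splitlines():
--         stripped = line.strip()
--         if stripped.lower().startswith("## extracted name"):
--             found = True
--             continue
--         if found and stripped and not stripped.startswith("#"):
--             return stripped
--     return None
-- ===== SOURCE B (Python) =====
-- def extract_display_name(text: str) -> str | None:
--     # Two-phase scan: locate the header line, then scan only the remaining lines.
--     lines = iter(text.splitlines())
--     for line in lines:
--         if line.strip().lower().startswith("## extracted name"):
--             break
--     else: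
--         return None
--     for line in lines:
--         stripped = line.strip()
--         if stripped and not stripped.startswith("#"):
--             return stripped
--     return None
-- ===== Notes on version B (the rewrite author's own statement) =====
-- stated objective: simpler
-- what changed: Replaced the single flag-driven pass with a two-phase decomposition: first locate the header line (for/else), then scan only the remaining lines for the first non-empty non-comment line.
import Mathlib
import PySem

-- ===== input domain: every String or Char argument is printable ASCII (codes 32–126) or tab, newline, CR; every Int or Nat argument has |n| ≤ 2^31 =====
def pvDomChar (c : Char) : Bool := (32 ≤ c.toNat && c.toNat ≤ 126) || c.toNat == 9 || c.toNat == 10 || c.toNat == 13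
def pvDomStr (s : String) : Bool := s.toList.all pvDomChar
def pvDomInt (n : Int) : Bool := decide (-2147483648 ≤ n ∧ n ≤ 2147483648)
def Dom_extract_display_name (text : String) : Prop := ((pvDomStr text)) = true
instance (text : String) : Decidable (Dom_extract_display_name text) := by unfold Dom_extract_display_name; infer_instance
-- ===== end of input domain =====

-- B replaces A's flag-driven single pass by a locate-header-then-scan-tail decomposition (same cost, plainer).


-- ===== PORT A =====
-- A's for-loop with the `found` flag and early return, as structural recursion over the lines.
def pvALoop : List String → Bool → Option String
  | [], _ => none
  | l :: rest, found =>
    let stripped := PySem.Str.strip l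
    if PySem.Str.startswith (PySem.Str.lower stripped) "## extracted name" then
      pvALoop rest true
    else if found && !(stripped == "") && !(PySem.Str.startswith stripped "#") then
      some stripped
    else
      pvALoop rest found

def extract_display_name (text : String) : Option String :=
  pvALoop (PySem.Str.splitlines text) false

-- ===== PORT B =====
-- Phase one: advance until the header line; return the remaining lines (none = for/else exhausted).
def pvFindHeader : List String → Option (List String)
  | [] => none
  | l :: rest =>
    if PySem.Str.startswith (PySem.Str.lower (PySem.Str.strip l)) "## extracted name" then
      some rest
    else
      pvFindHeader rest

-- Phase two: first non-empty line that does not start with '#'.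
def pvScanTail : List String → Option String
  | [] => none
  | l :: rest =>
    let stripped := PySem.Str.strip l
    if !(stripped == "") && !(PySem.Str.startswith stripped "#") then
      some stripped
    else
      pvScanTail rest

def extract_display_name_alt (text : String) : Option String :=
  match pvFindHeader (PySem.Str.splitlines text) with
  | none => none
  | some rest => pvScanTail rest

-- ===== PRECONDITION & SPEC =====
def Spec_extract_display_name (text : String) (out : Option String) : Prop := out = extract_display_name_alt text
instance (text : String) (out : Option String) : Decidable (Spec_extract_display_name text out) := by unfold Spec_extract_display_name; infer_instance

-- ===== CLAIM (what is proved, stated in full; the proofs are below) =====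
def Claim_equal_extract_display_name : Prop := ∀ (text : String), Dom_extract_display_name text → Spec_extract_display_name text (extract_display_name text)

-- ===== LEMMAS AND PROOFS =====

-- A lowercased character equal to '#' was '#' already.
theorem pvLowerChar_eq_hash {c : Char} (h : PySem.Chars.lowerChar c = '#') : c = '#' := by
  unfold PySem.Chars.lowerChar PySem.Chars.isupper at h
  split at h
  · next hu =>
    exfalso
    simp only [Bool.and_eq_true, decide_eq_true_eq, Char.le_def, UInt32.le_iff_toNat_le] at hu
    have hlo : 65 ≤ c.val.toNat := hu.1
    have hhi : c.val.toNat ≤ 90 := hu.2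
    have hc : c.toNat = c.val.toNat := rfl
    have hval : (Char.ofNat (c.toNat + 32)).toNat = c.toNat + 32 := by
      unfold Char.ofNat
      split
      · next hv => exact Char.toNat_ofNatAux hv
      · next hv => exact absurd (Or.inl (by omega)) hv
    rw [h] at hval
    have h35 : ('#').toNat = 35 := rfl
    omega
  · exact h

-- A line whose lowercased form starts with the header also starts with '#'.
theorem pvHeader_starts_hash (s : List Char)
    (h : PySem.Chars.startswith (PySem.Chars.lower s)
        ['#', '#', ' ', 'e', 'x', 't', 'r', 'a', 'c', 't', 'e', 'd', ' ', 'n', 'a', 'm', 'e'] = true) :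
    PySem.Chars.startswith s ['#'] = true := by
  rw [PySem.Chars.startswith_iff] at h ⊢
  cases s with
  | nil =>
    exfalso
    simp only [PySem.Chars.lower, List.map_nil] at h
    exact absurd (List.prefix_nil.mp h) (by decide)
  | cons c cs =>
    simp only [PySem.Chars.lower, List.map_cons] at h
    have hc : PySem.Chars.lowerChar c = '#' := by
      have hp := List.cons_prefix_cons.mp h
      exact hp.1.symm
    have hceq : c = '#' := pvLowerChar_eq_hash hc
    subst hceq
    exact List.cons_prefix_cons.mpr ⟨rfl, List.nil_prefix⟩

theorem pvLoop_true (ls : List String) : pvALoop ls true = pvScanTail ls := by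
  induction ls with
  | nil => rfl
  | cons l rest ih =>
    simp only [pvALoop, pvScanTail, PySem.Str.startswith_eq, PySem.Str.toList_lower,
      PySem.Str.toList_strip]
    by_cases hh : PySem.Chars.startswith (PySem.Chars.lower (PySem.Chars.strip l.toList))
        ['#', '#', ' ', 'e', 'x', 't', 'r', 'a', 'c', 't', 'e', 'd', ' ', 'n', 'a', 'm', 'e'] = true
    · have hhash := pvHeader_starts_hash _ hh
      simp [hh, hhash, ih]
    · simp only [Bool.not_eq_true] at hh
      simp [hh, ih]

theorem pvLoop_false (ls : List String) :
    pvALoop ls false =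
      (match pvFindHeader ls with
       | none => none
       | some rest => pvScanTail rest) := by
  induction ls with
  | nil => rfl
  | cons l rest ih =>
    simp only [pvALoop, pvFindHeader, PySem.Str.startswith_eq, PySem.Str.toList_lower,
      PySem.Str.toList_strip]
    by_cases hh : PySem.Chars.startswith (PySem.Chars.lower (PySem.Chars.strip l.toList))
        ['#', '#', ' ', 'e', 'x', 't', 'r', 'a', 'c', 't', 'e', 'd', ' ', 'n', 'a', 'm', 'e'] = true
    · simp [hh, pvLoop_true]
    · simp only [Bool.not_eq_true] at hh
      simp [hh, ih]

-- ===== VERDICT (by name: the statement is the Claim_ definition above) =====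
theorem extract_display_name_spec : Claim_equal_extract_display_name := by
  intro text _
  unfold Spec_extract_display_name extract_display_name extract_display_name_alt
  exact pvLoop_false _
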